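-- pv_equiv track=rewrite | github.com/SebastianCuneo/NASA-Will-It-Rain-On-My-Parade- | logic.py | parse_fallback_response
-- ===== SOURCE A (Python) =====
-- def parse_fallback_response(response_text: str) -> list:
--     """
--     Parse Gemini response when JSON parsing fails
--     """
--     alternatives = []
--     lines = response_text.split('\n')
--     current_alt = {}
--
--     for line in lines:
--         line = line.strip()
--         if not line or line.startswith('{') or line.startswith('}'):
--             continue
--
--         # Look for activity titles (various patterns)
--         if any(keyword in line.lower() for keyword in ['visit', 'go to', 'try', 'enjoy', 'explore', 'discover']):
--             if current_alt and current_alt.get('title'):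
--                 alternatives.append(current_alt)
--             current_alt = {
--                 "title": line,
--                 "description": "",
--                 "type": "mixed",
--                 "reason": "",
--                 "tips": "",
--                 "location": "Various locations",
--                 "duration": "1-3 hours",
--                 "cost": "Varies"
--             }
--         elif current_alt:
--             if not current_alt.get("description"):
--                 current_alt["description"] = line
--             elif not current_alt.get("reason"):
--                 current_alt["reason"] = line
--             elif not current_alt.get("tips"):
--                 current_alt["tips"] = line
--
--     if current_alt and current_alt.get('title'):
--         alternatives.append(current_alt)
--
--     return alternatives[:4]  # Limit to 4 alternatives
-- ===== SOURCE B (Python) =====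
-- # B: clean the lines first, segment them into (title, body) groups, then build
-- # the first four dicts positionally -- instead of A's single fold with a mutable
-- # current dict and conditional slot filling.
--
-- _KEYWORDS = ['visit', 'go to', 'try', 'enjoy', 'explore', 'discover']
--
--
-- def _is_title(line):
--     low = line.lower()
--     return any(k in low for k in _KEYWORDS)
--
--
-- def _segments(tokens):
--     """Split the cleaned token stream into (title, body) groups; tokens before
--     the first title are dropped."""
--     groups = []
--     i = 0
--     while i < len(tokens):
--         line = tokens[i]
--         i += 1
--         if _is_title(line):
--             body = []
--             while i < len(tokens) and not _is_title(tokens[i]):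
--                 body.append(tokens[i])
--                 i += 1
--             groups.append((line, body))
--     return groups
--
--
-- def _build(title, body):
--     return {
--         "title": title,
--         "description": body[0] if len(body) > 0 else '',
--         "type": "mixed",
--         "reason": body[1] if len(body) > 1 else '',
--         "tips": body[2] if len(body) > 2 else '',
--         "location": "Various locations",
--         "duration": "1-3 hours",
--         "cost": "Varies",
--     }
--
--
-- def parse_fallback_response(response_text: str) -> list:
--     cleaned = [s for s in (l.strip() for l in response_text.split('\n'))
--                if s and not s.startswith('{') and not s.startswith('}')]
--     return [_build(t, body) for t, body in _segments(cleaned)[:4]]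
-- ===== Notes on version B (the rewrite author's own statement) =====
-- stated objective: alternative
-- what changed: A interleaves cleaning, grouping and slot-filling in one fold over a mutable current dict with a conditional elif chain per slot; B first cleans the lines, then segments the token stream into (title, body) groups, then builds the first four dicts by positional assignment of the body lines.
import Mathlib
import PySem

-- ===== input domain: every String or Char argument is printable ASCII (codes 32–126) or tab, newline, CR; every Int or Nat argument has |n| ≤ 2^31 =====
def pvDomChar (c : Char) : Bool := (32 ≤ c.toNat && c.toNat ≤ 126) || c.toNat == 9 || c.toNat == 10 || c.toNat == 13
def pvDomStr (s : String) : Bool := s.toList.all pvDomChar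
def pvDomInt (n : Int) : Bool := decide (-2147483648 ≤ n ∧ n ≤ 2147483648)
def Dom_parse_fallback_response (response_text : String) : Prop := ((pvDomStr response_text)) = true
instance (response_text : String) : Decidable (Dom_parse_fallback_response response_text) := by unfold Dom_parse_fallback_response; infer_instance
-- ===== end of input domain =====

-- B restructures A's single fold (mutable current dict, elif slot-filling) into: clean the
-- lines, segment into (title, body) groups, build the first four dicts positionally
-- (alternative decomposition, same cost).

-- ===== PORT A =====
-- keyword test of both Pythons: any(k in line.lower() for k in [...])
def pvIsTitle (line : String) : Bool :=
  (["visit", "go to", "try", "enjoy", "explore", "discover"] : List String).any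
    (fun k => PySem.Str.isIn k (PySem.Str.lower line))

def pvNewAlt (line : String) : PySem.Dict String String :=
  PySem.Dict.ofList [("title", line), ("description", ""), ("type", "mixed"), ("reason", ""),
    ("tips", ""), ("location", "Various locations"), ("duration", "1-3 hours"), ("cost", "Varies")]

def pvStepA (st : List (PySem.Dict String String) × PySem.Dict String String) (rawLine : String) :
    List (PySem.Dict String String) × PySem.Dict String String :=
  let line := PySem.Str.strip rawLine
  if line == "" || PySem.Str.startswith line "{" || PySem.Str.startswith line "}" then st
  else if pvIsTitle line then
    let alts := if st.2.size != 0 && st.2.getD "title" "" != "" then st.1 ++ [st.2] else st.1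
    (alts, pvNewAlt line)
  else if st.2.size != 0 then
    let cur :=
      if st.2.getD "description" "" == "" then st.2.insert "description" line
      else if st.2.getD "reason" "" == "" then st.2.insert "reason" line
      else if st.2.getD "tips" "" == "" then st.2.insert "tips" line
      else st.2
    (st.1, cur)
  else st

def parse_fallback_response (response_text : String) : List (List (String × String)) :=
  let lines := (PySem.Str.split? response_text "\n").getD []
  let st := lines.foldl pvStepA ([], PySem.Dict.empty)
  let alternatives := if st.2.size != 0 && st.2.getD "title" "" != "" then st.1 ++ [st.2] else st.1
  (PySem.List.slice alternatives none (some 4)).map PySem.Dict.items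

-- ===== PORT B =====
def pvClean (s : String) : Bool :=
  !(s == "" || PySem.Str.startswith s "{" || PySem.Str.startswith s "}")

def pvSegments (tokens : List String) : List (String × List String) :=
  match tokens with
  | [] => []
  | line :: rest =>
    if pvIsTitle line then
      (line, rest.takeWhile (fun s => !pvIsTitle s)) ::
        pvSegments (rest.dropWhile (fun s => !pvIsTitle s))
    else pvSegments rest
termination_by tokens.length
decreasing_by
  · simpa using Nat.lt_succ_of_le (List.length_dropWhile_le _ _)
  · simp

-- body[k] if len(body) > k else '' — exactly List.getD at a nonnegative index
def pvBuild (title : String) (body : List String) : List (String × String) :=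
  [("title", title), ("description", body.getD 0 ""), ("type", "mixed"),
   ("reason", body.getD 1 ""), ("tips", body.getD 2 ""),
   ("location", "Various locations"), ("duration", "1-3 hours"), ("cost", "Varies")]

def parse_fallback_response_alt (response_text : String) : List (List (String × String)) :=
  let cleaned := (((PySem.Str.split? response_text "\n").getD []).map PySem.Str.strip).filter pvClean
  (PySem.List.slice (pvSegments cleaned) none (some 4)).map (fun p => pvBuild p.1 p.2)

-- ===== PRECONDITION & SPEC =====
def Spec_parse_fallback_response (response_text : String) (out : List (List (String × String))) : Prop := out = parse_fallback_response_alt response_text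
instance (response_text : String) (out : List (List (String × String))) : Decidable (Spec_parse_fallback_response response_text out) := by unfold Spec_parse_fallback_response; infer_instance

-- ===== CLAIM (what is proved, stated in full; the proofs are below) =====
def Claim_equal_parse_fallback_response : Prop := ∀ (response_text : String), Dom_parse_fallback_response response_text → Spec_parse_fallback_response response_text (parse_fallback_response response_text)

-- ===== LEMMAS AND PROOFS =====

-- A's dict state after a title `t` and filler lines `fs` have been absorbed.
def pvMkA (t : String) (fs : List String) : PySem.Dict String String :=
  PySem.Dict.mk (pvBuild t fs)

-- A's loop body on an already-stripped, clean line.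
def pvStepCore (st : List (PySem.Dict String String) × PySem.Dict String String) (line : String) :
    List (PySem.Dict String String) × PySem.Dict String String :=
  if pvIsTitle line then
    let alts := if st.2.size != 0 && st.2.getD "title" "" != "" then st.1 ++ [st.2] else st.1
    (alts, pvNewAlt line)
  else if st.2.size != 0 then
    let cur :=
      if st.2.getD "description" "" == "" then st.2.insert "description" line
      else if st.2.getD "reason" "" == "" then st.2.insert "reason" line
      else if st.2.getD "tips" "" == "" then st.2.insert "tips" line
      else st.2
    (st.1, cur)
  else st

-- A's tail: append the pending dict if it has a title, then take the items lists.
def pvFinal (st : List (PySem.Dict String String) × PySem.Dict String String) :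
    List (List (String × String)) :=
  (if st.2.size != 0 && st.2.getD "title" "" != "" then st.1 ++ [st.2] else st.1).map
    PySem.Dict.items

-- grouping with an open (title, fillers) group
def pvG (t : String) (fs : List String) : List String → List (String × List String)
  | [] => [(t, fs)]
  | s :: rest => if pvIsTitle s then (t, fs) :: pvG s [] rest else pvG t (fs ++ [s]) rest

lemma pvStepA_eq (st : List (PySem.Dict String String) × PySem.Dict String String)
    (raw : String) :
    pvStepA st raw =
      if pvClean (PySem.Str.strip raw) then pvStepCore st (PySem.Str.strip raw) else st := by
  unfold pvStepA pvStepCore pvClean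
  cases hc : (PySem.Str.strip raw == "" || PySem.Str.startswith (PySem.Str.strip raw) "{"
      || PySem.Str.startswith (PySem.Str.strip raw) "}") with
  | false =>
    simp at hc
    simp [hc.1.1, hc.1.2, hc.2]
  | true =>
    simp
    intro h1 h2 h3
    simp [h1, h2, h3] at hc

lemma pvNewAlt_eq (t : String) : pvNewAlt t = pvMkA t [] := rfl

lemma pvMkA_size (t : String) (fs : List String) : (pvMkA t fs).size = 8 := rfl

lemma pvMkA_getD_title (t : String) (fs : List String) : (pvMkA t fs).getD "title" "" = t := rfl

lemma pvMkA_getD_desc (t : String) (fs : List String) :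
    (pvMkA t fs).getD "description" "" = fs.getD 0 "" := rfl

lemma pvMkA_getD_reason (t : String) (fs : List String) :
    (pvMkA t fs).getD "reason" "" = fs.getD 1 "" := rfl

lemma pvMkA_getD_tips (t : String) (fs : List String) :
    (pvMkA t fs).getD "tips" "" = fs.getD 2 "" := rfl

lemma pvMkA_ins_desc (t s : String) : (pvMkA t []).insert "description" s = pvMkA t [s] := rfl

lemma pvMkA_ins_reason (t a s : String) :
    (pvMkA t [a]).insert "reason" s = pvMkA t [a, s] := rfl

lemma pvMkA_ins_tips (t a b s : String) :
    (pvMkA t [a, b]).insert "tips" s = pvMkA t [a, b, s] := rfl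

lemma pvMkA_extend_full (t a b c s : String) (rest : List String) :
    pvMkA t (a :: b :: c :: rest) = pvMkA t (a :: b :: c :: (rest ++ [s])) := rfl

lemma pvClean_ne (s : String) (h : pvClean s = true) : s ≠ "" := by
  simp only [pvClean, Bool.not_eq_eq_eq_not, Bool.not_true, Bool.or_eq_false_iff] at h
  intro he; subst he; simp at h

lemma pvFill (acc : List (PySem.Dict String String)) (t : String) (fs : List String) (s : String)
    (ht : t ≠ "") (_hs : s ≠ "") (hfs : ∀ x ∈ fs, x ≠ "") :
    pvStepCore (acc, pvMkA t fs) s =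
      if pvIsTitle s then (acc ++ [pvMkA t fs], pvMkA s []) else (acc, pvMkA t (fs ++ [s])) := by
  cases hT : pvIsTitle s with
  | true =>
    simp [pvStepCore, hT, pvMkA_size, pvMkA_getD_title, ht, pvNewAlt_eq]
  | false =>
    rcases fs with _ | ⟨a, _ | ⟨b, _ | ⟨c, rest⟩⟩⟩
    · simp [pvStepCore, hT, pvMkA_size, pvMkA_getD_desc, pvMkA_ins_desc]
    · have ha : a ≠ "" := hfs a (by simp)
      simp [pvStepCore, hT, pvMkA_size, pvMkA_getD_desc, pvMkA_getD_reason, ha,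
        pvMkA_ins_reason]
    · have ha : a ≠ "" := hfs a (by simp)
      have hb : b ≠ "" := hfs b (by simp)
      simp [pvStepCore, hT, pvMkA_size, pvMkA_getD_desc, pvMkA_getD_reason, pvMkA_getD_tips,
        ha, hb, pvMkA_ins_tips]
    · have ha : a ≠ "" := hfs a (by simp)
      have hb : b ≠ "" := hfs b (by simp)
      have hc : c ≠ "" := hfs c (by simp)
      simp [pvStepCore, hT, pvMkA_size, pvMkA_getD_desc, pvMkA_getD_reason, pvMkA_getD_tips,
        ha, hb, hc, ← pvMkA_extend_full t a b c s rest]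

lemma pvMkA_items (t : String) (fs : List String) : (pvMkA t fs).items = pvBuild t fs := rfl

lemma pvMain (ts : List String) (acc : List (PySem.Dict String String)) (t : String)
    (fs : List String) (hts : ∀ x ∈ ts, pvClean x = true) (ht : t ≠ "")
    (hfs : ∀ x ∈ fs, x ≠ "") :
    pvFinal (ts.foldl pvStepCore (acc, pvMkA t fs)) =
      acc.map PySem.Dict.items ++ (pvG t fs ts).map (fun p => pvBuild p.1 p.2) := by
  induction ts generalizing acc t fs with
  | nil =>
    simp [pvFinal, pvG, pvMkA_size, pvMkA_getD_title, ht, pvMkA_items]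
  | cons s rest ih =>
    have hs : pvClean s = true := hts s (by simp)
    have hsne := pvClean_ne s hs
    rw [List.foldl_cons, pvFill acc t fs s ht hsne hfs]
    cases hT : pvIsTitle s with
    | true =>
      rw [if_pos rfl]
      rw [ih (acc ++ [pvMkA t fs]) s [] (fun x hx => hts x (by simp [hx])) hsne (by simp)]
      simp [pvG, hT, pvMkA_items]
    | false =>
      rw [if_neg (by simp)]
      rw [ih acc t (fs ++ [s]) (fun x hx => hts x (by simp [hx])) ht
        (by intro x hx; rcases List.mem_append.mp hx with h | h
            · exact hfs x h
            · simp at h; subst h; exact hsne)]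
      simp [pvG, hT]

lemma pvGseg (ts : List String) (t : String) (fs : List String) :
    pvG t fs ts = (t, fs ++ ts.takeWhile (fun s => !pvIsTitle s)) ::
      pvSegments (ts.dropWhile (fun s => !pvIsTitle s)) := by
  induction ts generalizing t fs with
  | nil => simp [pvG, pvSegments]
  | cons s rest ih =>
    cases hT : pvIsTitle s with
    | true =>
      rw [pvG, if_pos hT, ih s []]
      simp [pvSegments, hT]
    | false =>
      rw [pvG, if_neg (by simp [hT]), ih t (fs ++ [s])]
      simp [hT]

lemma pvStart (ts : List String) (hts : ∀ x ∈ ts, pvClean x = true) :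
    pvFinal (ts.foldl pvStepCore ([], PySem.Dict.empty)) =
      (pvSegments ts).map (fun p => pvBuild p.1 p.2) := by
  induction ts with
  | nil => simp [pvFinal, pvSegments, PySem.Dict.size]
  | cons s rest ih =>
    have hs : pvClean s = true := hts s (by simp)
    have hsne := pvClean_ne s hs
    rw [List.foldl_cons]
    cases hT : pvIsTitle s with
    | true =>
      have hstep : pvStepCore ([], PySem.Dict.empty) s = ([], pvMkA s []) := by
        simp [pvStepCore, hT, PySem.Dict.size, pvNewAlt_eq]
      rw [hstep, pvMain rest [] s [] (fun x hx => hts x (by simp [hx])) hsne (by simp)]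
      rw [pvGseg]
      conv_rhs => rw [pvSegments]
      simp [hT]
    | false =>
      have hstep : pvStepCore ([], PySem.Dict.empty) s = ([], PySem.Dict.empty) := by
        simp [pvStepCore, hT, PySem.Dict.size]
        exact fun h => absurd rfl h
      rw [hstep, ih (fun x hx => hts x (by simp [hx]))]
      conv_rhs => rw [pvSegments]
      simp [hT]

-- ===== VERDICT (by name: the statement is the Claim_ definition above) =====
theorem parse_fallback_response_spec : Claim_equal_parse_fallback_response := by
  intro response_text _
  unfold Spec_parse_fallback_response
  simp only [parse_fallback_response, parse_fallback_response_alt]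
  set lines := (PySem.Str.split? response_text "\n").getD [] with hlines
  set cleaned := (lines.map PySem.Str.strip).filter pvClean with hcleaned
  have hsl : ∀ {α : Type} (xs : List α), PySem.List.slice xs none (some 4) = xs.take 4 := by
    intro α xs
    rw [PySem.List.slice_to xs (b := 4) (by norm_num)]
    rfl
  have hfold : lines.foldl pvStepA ([], PySem.Dict.empty) =
      cleaned.foldl pvStepCore ([], PySem.Dict.empty) := by
    rw [PySem.List.foldl_congr_mem lines pvStepA
        (fun st raw => if pvClean (PySem.Str.strip raw) then pvStepCore st (PySem.Str.strip raw) else st)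
        ([], PySem.Dict.empty) (fun acc x _ => pvStepA_eq acc x)]
    rw [← List.foldl_map (f := PySem.Str.strip)
        (g := fun st l => if pvClean l then pvStepCore st l else st)]
    exact PySem.List.foldl_if_eq_foldl_filter pvClean pvStepCore (lines.map PySem.Str.strip) ([], PySem.Dict.empty)
  rw [hfold]
  rw [hsl, hsl]
  rw [List.map_take, List.map_take]
  have hfin := pvStart cleaned (fun x hx => (List.mem_filter.mp hx).2)
  unfold pvFinal at hfin
  rw [hfin]
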